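-- pv_equiv track=rewrite | github.com/jautung/advent | advent2023/12.py | dr_strange
-- ===== SOURCE A (Python) =====
-- import copy
--
-- def dr_strange(onsen):
--     if '?' not in onsen:
--         return [onsen]
--     i = onsen.index('?')
--     o1 = copy.deepcopy(onsen)
--     o1[i] = '.'
--     o2 = copy.deepcopy(onsen)
--     o2[i] = '#'
--     return dr_strange(o1) + dr_strange(o2)
-- ===== SOURCE B (Python) =====
-- def dr_strange(onsen):
--     results = [[]]
--     for c in onsen:
--         if c == '?':
--             results = [r + [x] for r in results for x in ('.', '#')]
--         else:
--             results = [r + [c] for r in results]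
--     return results
-- ===== Notes on version B (the rewrite author's own statement) =====
-- stated objective: faster
-- what changed: Replaced the branching recursion (deepcopy the whole list twice at the first '?', recurse on each copy, concatenate exponentially many result lists) by a single left-to-right pass that keeps the list of partial fillings and extends each by one element per position, eliminating deepcopy and recursion entirely.
import Mathlib
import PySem

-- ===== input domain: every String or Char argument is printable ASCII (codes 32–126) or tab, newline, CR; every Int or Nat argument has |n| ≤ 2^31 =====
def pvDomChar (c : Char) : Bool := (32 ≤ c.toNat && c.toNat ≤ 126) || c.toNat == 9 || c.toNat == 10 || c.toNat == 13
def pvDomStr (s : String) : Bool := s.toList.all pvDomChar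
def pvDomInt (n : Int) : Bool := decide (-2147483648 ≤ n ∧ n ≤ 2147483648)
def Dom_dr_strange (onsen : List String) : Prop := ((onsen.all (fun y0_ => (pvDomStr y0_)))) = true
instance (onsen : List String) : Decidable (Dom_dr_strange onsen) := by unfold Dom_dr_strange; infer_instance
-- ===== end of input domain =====

-- B replaces A's branching recursion with deepcopies by one left-to-right pass extending
-- partial fillings; measurably faster (no deepcopy, no recursion). Equivalence is on values.

-- ===== PORT A =====
-- termination helper: replacing the first "?" by a non-"?" string lowers the "?" count
theorem pv_count_set_lt (xs : List String) (w : String) (hw : w ≠ "?") (hm : "?" ∈ xs) :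
    (PySem.List.pySetD xs ((((PySem.List.index? xs "?").getD 0 : Nat)) : Int) w).count "?"
      < xs.count "?" := by
  obtain ⟨k, hk⟩ := Option.isSome_iff_exists.mp ((PySem.List.index?_isSome_iff _ _).mpr hm)
  obtain ⟨pre, suf, rfl, hlen, hpre⟩ := (PySem.List.index?_eq_some_iff _ _ _).mp hk
  subst hlen
  rw [PySem.List.index?_eq_idxOf?] at hk
  simp [hk, List.count_append, hw]

def dr_strange (onsen : List String) : List (List String) :=
  if _hq : "?" ∉ onsen then [onsen]
  else
    let i : Nat := (PySem.List.index? onsen "?").getD 0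
    let o1 := PySem.List.pySetD onsen (i : Int) "."
    let o2 := PySem.List.pySetD onsen (i : Int) "#"
    dr_strange o1 ++ dr_strange o2
termination_by onsen.count "?"
decreasing_by
  · exact pv_count_set_lt onsen "." (by decide) (not_not.mp _hq)
  · exact pv_count_set_lt onsen "#" (by decide) (not_not.mp _hq)

-- ===== PORT B =====
def dr_strange_alt (onsen : List String) : List (List String) :=
  onsen.foldl
    (fun results c =>
      if c == "?" then results.flatMap (fun r => [".", "#"].map (fun x => r ++ [x]))
      else results.map (fun r => r ++ [c]))
    [[]]

-- ===== PRECONDITION & SPEC =====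
def Spec_dr_strange (onsen : List String) (out : List (List String)) : Prop := out = dr_strange_alt onsen
instance (onsen : List String) (out : List (List String)) : Decidable (Spec_dr_strange onsen out) := by unfold Spec_dr_strange; infer_instance

-- ===== CLAIM (what is proved, stated in full; the proofs are below) =====
def Claim_equal_dr_strange : Prop := ∀ (onsen : List String), Dom_dr_strange onsen → Spec_dr_strange onsen (dr_strange onsen)

-- ===== LEMMAS AND PROOFS =====

-- the common characterisation: all fillings of the '?' slots, leftmost most significant, '.' first
def pvExpand : List String → List (List String)
  | [] => [[]]
  | c :: cs =>
      if c = "?" then (pvExpand cs).map ("." :: ·) ++ (pvExpand cs).map ("#" :: ·)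
      else (pvExpand cs).map (c :: ·)

theorem pvExpand_no_q (xs : List String) (h : "?" ∉ xs) : pvExpand xs = [xs] := by
  induction xs with
  | nil => rfl
  | cons c cs ih =>
      simp only [List.mem_cons, not_or] at h
      simp [pvExpand, Ne.symm h.1, ih h.2]

theorem pvExpand_append_no_q (pre rest : List String) (h : "?" ∉ pre) :
    pvExpand (pre ++ rest) = (pvExpand rest).map (pre ++ ·) := by
  induction pre with
  | nil => simp
  | cons p pre ih =>
      simp only [List.mem_cons, not_or] at h
      simp [pvExpand, Ne.symm h.1, ih h.2, List.map_map, Function.comp_def]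

theorem pv_foldl_eq (cs : List String) (acc : List (List String)) :
    cs.foldl
      (fun results c =>
        if c == "?" then results.flatMap (fun r => [".", "#"].map (fun x => r ++ [x]))
        else results.map (fun r => r ++ [c]))
      acc
    = acc.flatMap (fun r => (pvExpand cs).map (r ++ ·)) := by
  induction cs generalizing acc with
  | nil => simp [pvExpand]
  | cons c cs ih =>
      by_cases hc : c = "?"
      · subst hc
        simp only [List.foldl_cons, BEq.rfl, if_true, ih, pvExpand,
          List.flatMap_assoc]
        simp [List.map_map, Function.comp_def, List.append_assoc]
      · rw [List.foldl_cons, ih]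
        simp [hc, pvExpand, List.flatMap_map, List.map_map, Function.comp_def,
          List.append_assoc]

theorem pv_alt_eq_expand (onsen : List String) : dr_strange_alt onsen = pvExpand onsen := by
  rw [dr_strange_alt, pv_foldl_eq]
  simp

theorem pv_a_eq_expand (onsen : List String) : dr_strange onsen = pvExpand onsen := by
  generalize hn : onsen.count "?" = n
  induction n using Nat.strong_induction_on generalizing onsen with
  | _ n ih =>
      by_cases hq : "?" ∈ onsen
      · obtain ⟨k, hk⟩ := Option.isSome_iff_exists.mp ((PySem.List.index?_isSome_iff _ _).mpr hq)
        obtain ⟨pre, suf, rfl, hlen, hpre⟩ := (PySem.List.index?_eq_some_iff _ _ _).mp hk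
        subst hlen
        rw [dr_strange]
        simp only [hq, not_true_eq_false, dite_false, hk, Option.getD_some,
          PySem.List.pySetD_natCast]
        have hset : ∀ w : String,
            (pre ++ "?" :: suf).set pre.length w = pre ++ w :: suf := by
          intro w; simp
        have hcount : ∀ w : String, w ≠ "?" →
            (pre ++ w :: suf).count "?" < n := by
          intro w hw
          subst hn
          simp [List.count_append, hw]
        rw [hset, hset,
          ih _ (hcount "." (by decide)) _ rfl,
          ih _ (hcount "#" (by decide)) _ rfl,
          pvExpand_append_no_q _ _ hpre, pvExpand_append_no_q _ _ hpre,
          pvExpand_append_no_q _ _ hpre]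
        simp [pvExpand, List.map_map]
      · rw [dr_strange]
        simp [hq, pvExpand_no_q _ hq]

-- ===== VERDICT (by name: the statement is the Claim_ definition above) =====
theorem dr_strange_spec : Claim_equal_dr_strange := by
  intro onsen _
  unfold Spec_dr_strange
  rw [pv_a_eq_expand, pv_alt_eq_expand]
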